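-- pv_equiv track=rewrite | github.com/lorenzomatheo/datalake-mocked | maggulake/enums/categorias.py | normalizar_categoria
-- ===== SOURCE A (Python) =====
-- def normalizar_categoria(
--     categoria: str, lista_categorias: list[str]
-- ) -> str | None:
--     """
--     Normaliza uma categoria fazendo match case-insensitive.
--
--     Args:
--         categoria: Categoria a normalizar
--         lista_categorias: Lista de categorias válidas
--
--     Returns:
--         Categoria normalizada ou None se não encontrada
--     """
--     # Primeiro tenta match exato
--     if categoria in lista_categorias:
--         return categoria
--
--     # Depois tenta case insensitive
--     # NOTE: usa o next que é mais eficiente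
--     return next(
--         (cat for cat in lista_categorias if cat.lower() == categoria.lower()), None
--     )
-- ===== SOURCE B (Python) =====
-- def normalizar_categoria(categoria, lista_categorias):
--     fallback = None
--     for cat in lista_categorias:
--         if cat == categoria:
--             return categoria
--         if fallback is None and cat.lower() == categoria.lower():
--             fallback = cat
--     return fallback
-- ===== Notes on version B (the rewrite author's own statement) =====
-- stated objective: simpler
-- what changed: Replaces A's two scans (exact membership test, then a generator scan for the first case-insensitive match) with a single loop carrying one fallback accumulator.
import Mathlib
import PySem

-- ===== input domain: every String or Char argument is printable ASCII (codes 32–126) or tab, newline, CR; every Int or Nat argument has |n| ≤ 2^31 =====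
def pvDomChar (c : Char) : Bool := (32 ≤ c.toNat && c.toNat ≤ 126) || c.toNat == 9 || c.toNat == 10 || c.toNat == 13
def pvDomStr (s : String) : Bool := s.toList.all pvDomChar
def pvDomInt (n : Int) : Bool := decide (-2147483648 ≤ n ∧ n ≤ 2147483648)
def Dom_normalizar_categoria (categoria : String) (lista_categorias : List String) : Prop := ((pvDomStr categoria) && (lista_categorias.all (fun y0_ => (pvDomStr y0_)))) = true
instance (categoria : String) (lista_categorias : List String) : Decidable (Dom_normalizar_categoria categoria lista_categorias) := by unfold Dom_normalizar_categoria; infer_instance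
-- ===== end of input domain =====

-- B replaces A's two scans (exact membership, then a generator scan for the first
-- case-insensitive match) with one loop carrying a fallback accumulator (objective: simpler).


-- ===== PORT A =====
-- A: exact-membership test first, then `next` over a generator of case-insensitive matches.
def normalizar_categoria (categoria : String) (lista_categorias : List String) : Option String :=
  if categoria ∈ lista_categorias then some categoria
  else lista_categorias.find? (fun cat => PySem.Str.lower cat == PySem.Str.lower categoria)

-- ===== PORT B =====
-- B: single loop with a fallback accumulator.
def nc_loop (categoria : String) : List String → Option String → Option String
  | [], fallback => fallback
  | cat :: rest, fallback =>
    if cat = categoria then some categoria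
    else nc_loop categoria rest
      (if fallback = none ∧ PySem.Str.lower cat == PySem.Str.lower categoria then some cat
       else fallback)

def normalizar_categoria_alt (categoria : String) (lista_categorias : List String) : Option String :=
  nc_loop categoria lista_categorias none

-- ===== PRECONDITION & SPEC =====
def Spec_normalizar_categoria (categoria : String) (lista_categorias : List String) (out : Option String) : Prop := out = normalizar_categoria_alt categoria lista_categorias
instance (categoria : String) (lista_categorias : List String) (out : Option String) : Decidable (Spec_normalizar_categoria categoria lista_categorias out) := by unfold Spec_normalizar_categoria; infer_instance

-- ===== CLAIM (what is proved, stated in full; the proofs are below) =====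
def Claim_equal_normalizar_categoria : Prop := ∀ (categoria : String) (lista_categorias : List String), Dom_normalizar_categoria categoria lista_categorias → Spec_normalizar_categoria categoria lista_categorias (normalizar_categoria categoria lista_categorias)

-- ===== LEMMAS AND PROOFS =====
theorem nc_loop_eq (categoria : String) (l : List String) (fb : Option String) :
    nc_loop categoria l fb =
      if categoria ∈ l then some categoria
      else match fb with
        | some v => some v
        | none => l.find? (fun cat => PySem.Str.lower cat == PySem.Str.lower categoria) := by
  induction l generalizing fb with
  | nil => cases fb <;> simp [nc_loop, List.find?]
  | cons cat rest ih =>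
    by_cases h : cat = categoria
    · subst h; simp [nc_loop]
    · have hne : ¬ categoria = cat := fun e => h e.symm
      simp only [nc_loop, if_neg h, ih, List.mem_cons, hne, false_or, List.find?]
      cases fb with
      | some v => simp
      | none =>
        by_cases hp : (PySem.Str.lower cat == PySem.Str.lower categoria) = true
        · simp [hp]
        · simp [hp]

-- ===== VERDICT (by name: the statement is the Claim_ definition above) =====
theorem normalizar_categoria_spec : Claim_equal_normalizar_categoria := by
  intro categoria l _
  unfold Spec_normalizar_categoria normalizar_categoria normalizar_categoria_alt
  rw [nc_loop_eq]
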